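-- pv_equiv track=rewrite | github.com/zjukg/Temp-R1 | scripts/data_process/generate_sft_cron.py | truncate_at_first_action
-- ===== SOURCE A (Python) =====
-- def truncate_at_first_action(response: str) -> str:
--     search_pos = response.find('</search>')
--     answer_pos = response.find('</answer>')
--     positions = [(pos, tag) for pos, tag in [(search_pos, '</search>'), (answer_pos, '</answer>')] if pos != -1]
--
--     if not positions:
--         return response
--
--     first_pos, first_tag = min(positions, key=lambda x: x[0])
--     return response[:first_pos + len(first_tag)]
-- ===== SOURCE B (Python) =====
-- def truncate_at_first_action(response: str) -> str:
--     # Single left-to-right scan: stop at the earliest closing tag.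
--     for i in range(len(response)):
--         chunk = response[i:i + 9]
--         if chunk == '</search>' or chunk == '</answer>':
--             return response[:i + 9]
--     return response
-- ===== Notes on version B (the rewrite author's own statement) =====
-- stated objective: alternative
-- what changed: Replaces the two separate find() calls, the position-list building and the min() selection by one left-to-right scan that returns as soon as either 9-char tag matches at the current index.
import Mathlib
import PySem

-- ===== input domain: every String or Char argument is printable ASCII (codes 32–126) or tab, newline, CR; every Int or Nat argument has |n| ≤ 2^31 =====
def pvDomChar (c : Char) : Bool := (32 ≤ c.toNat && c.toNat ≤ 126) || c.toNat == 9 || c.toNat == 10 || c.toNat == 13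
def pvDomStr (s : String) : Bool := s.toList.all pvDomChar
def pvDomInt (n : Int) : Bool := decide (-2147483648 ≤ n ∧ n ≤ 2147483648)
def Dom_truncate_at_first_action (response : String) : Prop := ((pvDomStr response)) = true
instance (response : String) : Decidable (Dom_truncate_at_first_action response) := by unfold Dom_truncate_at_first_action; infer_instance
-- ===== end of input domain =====

-- B replaces the two find() calls, the position list and min() by one left-to-right scan (alternative, same cost).

-- ===== PORT A =====
def truncate_at_first_action (response : String) : String :=
  let search_pos : Int := PySem.Str.find response "</search>"
  let answer_pos : Int := PySem.Str.find response "</answer>"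
  let positions : List (Int × String) :=
    ([(search_pos, "</search>"), (answer_pos, "</answer>")]).filter (fun pt => pt.1 != -1)
  match PySem.List.min? positions (fun x => x.1) with
  | none => response
  | some ft => PySem.Str.slice response none (some (ft.1 + (PySem.Str.len ft.2 : Int)))

-- ===== PORT B =====
-- B's for-loop with early return, as structural recursion building the kept prefix
def altGo : List Char → Option (List Char)
  | [] => none
  | c :: rest =>
      if "</search>".toList.isPrefixOf (c :: rest) || "</answer>".toList.isPrefixOf (c :: rest) then
        some ((c :: rest).take 9)
      else
        match altGo rest with
        | none => none
        | some t => some (c :: t)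

def truncate_at_first_action_alt (response : String) : String :=
  match altGo response.toList with
  | none => response
  | some t => String.ofList t

-- ===== PRECONDITION & SPEC =====
def Spec_truncate_at_first_action (response : String) (out : String) : Prop := out = truncate_at_first_action_alt response
instance (response : String) (out : String) : Decidable (Spec_truncate_at_first_action response out) := by unfold Spec_truncate_at_first_action; infer_instance

-- ===== CLAIM (what is proved, stated in full; the proofs are below) =====
def Claim_equal_truncate_at_first_action : Prop := ∀ (response : String), Dom_truncate_at_first_action response → Spec_truncate_at_first_action response (truncate_at_first_action response)

-- ===== LEMMAS AND PROOFS =====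

theorem eS : "</search>".toList = ['<', '/', 's', 'e', 'a', 'r', 'c', 'h', '>'] := by decide

theorem eA : "</answer>".toList = ['<', '/', 'a', 'n', 's', 'w', 'e', 'r', '>'] := by decide

theorem altGo_none (cs : List Char)
    (h : ∀ i, ¬ ['<', '/', 's', 'e', 'a', 'r', 'c', 'h', '>'] <+: cs.drop i ∧
              ¬ ['<', '/', 'a', 'n', 's', 'w', 'e', 'r', '>'] <+: cs.drop i) :
    altGo cs = none := by
  induction cs with
  | nil => rfl
  | cons c rest ih =>
      have h0 := h 0
      simp only [List.drop_zero] at h0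
      have hs : "</search>".toList.isPrefixOf (c :: rest) = false := by
        rw [eS]
        exact Bool.eq_false_iff.mpr (fun hb => h0.1 (List.isPrefixOf_iff_prefix.mp hb))
      have ha : "</answer>".toList.isPrefixOf (c :: rest) = false := by
        rw [eA]
        exact Bool.eq_false_iff.mpr (fun hb => h0.2 (List.isPrefixOf_iff_prefix.mp hb))
      have ih' := ih (fun i => by simpa using h (i + 1))
      simp only [altGo, hs, ha, Bool.or_self, Bool.false_eq_true, if_false, ih']

theorem altGo_first (cs : List Char) (m : Nat)
    (hm : ['<', '/', 's', 'e', 'a', 'r', 'c', 'h', '>'] <+: cs.drop m ∨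
          ['<', '/', 'a', 'n', 's', 'w', 'e', 'r', '>'] <+: cs.drop m)
    (hmin : ∀ i < m, ¬ ['<', '/', 's', 'e', 'a', 'r', 'c', 'h', '>'] <+: cs.drop i ∧
                     ¬ ['<', '/', 'a', 'n', 's', 'w', 'e', 'r', '>'] <+: cs.drop i) :
    altGo cs = some (cs.take (m + 9)) := by
  induction cs generalizing m with
  | nil =>
      rcases hm with h | h <;> · simp at h
  | cons c rest ih =>
      cases m with
      | zero =>
          simp only [List.drop_zero] at hm
          have ht : ("</search>".toList.isPrefixOf (c :: rest) || "</answer>".toList.isPrefixOf (c :: rest)) = true := by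
            rcases hm with h | h
            · rw [eS, List.isPrefixOf_iff_prefix.mpr h, Bool.true_or]
            · rw [eA, List.isPrefixOf_iff_prefix.mpr h, Bool.or_true]
          simp only [altGo, ht]
          simp
      | succ k =>
          have h0 := hmin 0 (Nat.succ_pos _)
          simp only [List.drop_zero] at h0
          have hs : "</search>".toList.isPrefixOf (c :: rest) = false := by
            rw [eS]
            exact Bool.eq_false_iff.mpr (fun hb => h0.1 (List.isPrefixOf_iff_prefix.mp hb))
          have ha : "</answer>".toList.isPrefixOf (c :: rest) = false := by
            rw [eA]
            exact Bool.eq_false_iff.mpr (fun hb => h0.2 (List.isPrefixOf_iff_prefix.mp hb))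
          have ih' := ih k (by simpa using hm)
            (fun i hi => by simpa using hmin (i + 1) (by omega))
          simp only [altGo, hs, ha, Bool.or_self, Bool.false_eq_true, if_false, ih',
            show k + 1 + 9 = (k + 9) + 1 from by omega, List.take_succ_cons]

theorem no_occ_of_find_neg (cs sub : List Char) (h : PySem.Chars.find cs sub = -1) :
    ∀ i, ¬ sub <+: cs.drop i := by
  intro i hp
  have hinf : sub <:+: cs := hp.isInfix.trans (List.drop_suffix i cs).isInfix
  exact ((PySem.Chars.find_eq_neg_one_iff _ _).mp h) hinf

theorem result_of_hit (response : String) (b : Int) (hb : 0 ≤ b)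
    (hm : ['<', '/', 's', 'e', 'a', 'r', 'c', 'h', '>'] <+: response.toList.drop b.toNat ∨
          ['<', '/', 'a', 'n', 's', 'w', 'e', 'r', '>'] <+: response.toList.drop b.toNat)
    (hmin : ∀ i < b.toNat, ¬ ['<', '/', 's', 'e', 'a', 'r', 'c', 'h', '>'] <+: response.toList.drop i ∧
                           ¬ ['<', '/', 'a', 'n', 's', 'w', 'e', 'r', '>'] <+: response.toList.drop i) :
    PySem.Str.slice response none (some (b + 9)) = truncate_at_first_action_alt response := by
  have hb9 : 0 ≤ b + 9 := by omega
  have hgo := altGo_first response.toList b.toNat hm hmin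
  unfold truncate_at_first_action_alt
  rw [hgo]
  apply String.toList_inj.mp
  simp only [PySem.Str.toList_slice, PySem.Chars.slice_eq_listSlice, String.toList_ofList]
  rw [PySem.List.slice_to]
  case hb => omega
  congr 1
  omega

-- ===== VERDICT (by name: the statement is the Claim_ definition above) =====
theorem truncate_at_first_action_spec : Claim_equal_truncate_at_first_action := by
  intro response _
  unfold Spec_truncate_at_first_action
  by_cases hS : PySem.Chars.find response.toList ['<', '/', 's', 'e', 'a', 'r', 'c', 'h', '>'] = -1 <;>
    by_cases hA : PySem.Chars.find response.toList ['<', '/', 'a', 'n', 's', 'w', 'e', 'r', '>'] = -1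
  · -- neither tag occurs
    have hnone := altGo_none response.toList
      (fun i => ⟨no_occ_of_find_neg _ _ hS i, no_occ_of_find_neg _ _ hA i⟩)
    simp [truncate_at_first_action, truncate_at_first_action_alt, hS, hA, hnone, PySem.List.min?]
  · -- only </answer> occurs
    have h0a : 0 ≤ PySem.Chars.find response.toList ['<', '/', 'a', 'n', 's', 'w', 'e', 'r', '>'] := by
      have := PySem.Chars.neg_one_le_find (s := response.toList) (sub := ['<', '/', 'a', 'n', 's', 'w', 'e', 'r', '>'])
      omega
    have hspec := PySem.Chars.find_spec (s := response.toList) (sub := ['<', '/', 'a', 'n', 's', 'w', 'e', 'r', '>']) h0a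
    have hres := result_of_hit response _ h0a (Or.inr hspec.1)
      (fun i hi => ⟨no_occ_of_find_neg _ _ hS i, hspec.2 i hi⟩)
    simpa [truncate_at_first_action, hS, hA, PySem.List.min?, PySem.Str.len] using hres
  · -- only </search> occurs
    have h0s : 0 ≤ PySem.Chars.find response.toList ['<', '/', 's', 'e', 'a', 'r', 'c', 'h', '>'] := by
      have := PySem.Chars.neg_one_le_find (s := response.toList) (sub := ['<', '/', 's', 'e', 'a', 'r', 'c', 'h', '>'])
      omega
    have hspec := PySem.Chars.find_spec (s := response.toList) (sub := ['<', '/', 's', 'e', 'a', 'r', 'c', 'h', '>']) h0s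
    have hres := result_of_hit response _ h0s (Or.inl hspec.1)
      (fun i hi => ⟨hspec.2 i hi, no_occ_of_find_neg _ _ hA i⟩)
    simpa [truncate_at_first_action, hS, hA, PySem.List.min?, PySem.Str.len] using hres
  · -- both occur: the minimum position wins
    have h0s : 0 ≤ PySem.Chars.find response.toList ['<', '/', 's', 'e', 'a', 'r', 'c', 'h', '>'] := by
      have := PySem.Chars.neg_one_le_find (s := response.toList) (sub := ['<', '/', 's', 'e', 'a', 'r', 'c', 'h', '>'])
      omega
    have h0a : 0 ≤ PySem.Chars.find response.toList ['<', '/', 'a', 'n', 's', 'w', 'e', 'r', '>'] := by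
      have := PySem.Chars.neg_one_le_find (s := response.toList) (sub := ['<', '/', 'a', 'n', 's', 'w', 'e', 'r', '>'])
      omega
    have hspecS := PySem.Chars.find_spec (s := response.toList) (sub := ['<', '/', 's', 'e', 'a', 'r', 'c', 'h', '>']) h0s
    have hspecA := PySem.Chars.find_spec (s := response.toList) (sub := ['<', '/', 'a', 'n', 's', 'w', 'e', 'r', '>']) h0a
    by_cases hlt : PySem.Chars.find response.toList ['<', '/', 'a', 'n', 's', 'w', 'e', 'r', '>'] <
        PySem.Chars.find response.toList ['<', '/', 's', 'e', 'a', 'r', 'c', 'h', '>']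
    · have hres := result_of_hit response _ h0a (Or.inr hspecA.1)
        (fun i hi => ⟨hspecS.2 i (by omega), hspecA.2 i hi⟩)
      simpa [truncate_at_first_action, hS, hA, PySem.List.min?, hlt, PySem.Str.len] using hres
    · have hres := result_of_hit response _ h0s (Or.inl hspecS.1)
        (fun i hi => ⟨hspecS.2 i hi, hspecA.2 i (by omega)⟩)
      simpa [truncate_at_first_action, hS, hA, PySem.List.min?, hlt, PySem.Str.len] using hres
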